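-- pv_equiv track=rewrite | github.com/zbvs/algorithm-challenge | programmers/60059/main.py | check
-- ===== SOURCE A (Python) =====
-- def check_one(key, lock, key_x, key_y, lock_x, lock_y, ovsize_x, ovsize_y, hole):
--     for i in range(0, ovsize_y):
--         for j in range(0, ovsize_x):
--             if key[key_y + i][key_x + j] == lock[lock_y + i][lock_x +j]:
--                 return False
--             if lock[lock_y + i][lock_x + j] == 0:
--                 hole -= 1
--     return hole == 0
--
-- def check(key, lock, hole):
--     size = len(key) + len(lock) - 1
--     lock_y = len(key) - 1
--     lock_x = len(key) - 1
--     for key_y in range(0, size):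
--         for key_x in range(0, size):
--             ovlap_y = max(key_y, lock_y)
--             ovsize_y = min(key_y + len(key) - ovlap_y, lock_y + len(lock) - ovlap_y)
--
--             ovlap_x = max(key_x, lock_x)
--             ovsize_x = min(key_x + len(key) - ovlap_x, lock_x + len(lock) - ovlap_x)
--
--             if check_one(key, lock, ovlap_x - key_x, ovlap_y - key_y,
--                          ovlap_x - lock_x, ovlap_y - lock_y, ovsize_x, ovsize_y, hole):
--                 return True
--     return False
-- ===== SOURCE B (Python) =====
-- def check(key, lock, hole):
--     n, m = len(key), len(lock)
--     # 2D prefix sums of zero-counts over lock: P[r][c] = #{(i,j) : i<r, j<c, lock[i][j]==0}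
--     P = [[0] * (m + 1)]
--     for i in range(m):
--         prev = P[-1]
--         row = [0]
--         for j in range(m):
--             row.append(prev[j + 1] + row[j] - prev[j] + (1 if lock[i][j] == 0 else 0))
--         P.append(row)
--     # slide key by displacement (dy, dx); overlap rows [r0,r1), cols [c0,c1) in lock coordinates
--     for dy in range(1 - n, m):
--         for dx in range(1 - n, m):
--             r0, r1 = max(0, dy), min(m, dy + n)
--             c0, c1 = max(0, dx), min(m, dx + n)
--             zeros = P[r1][c1] - P[r0][c1] - P[r1][c0] + P[r0][c0]
--             if zeros == hole and all(key[r - dy][c - dx] != lock[r][c]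
--                                      for r in range(r0, r1) for c in range(c0, c1)):
--                 return True
--     return False
-- ===== Notes on version B (the rewrite author's own statement) =====
-- stated objective: alternative
-- what changed: B enumerates key/lock displacements directly and precomputes a 2D prefix-sum table of lock's zero counts, so each offset's hole count is O(1) table arithmetic and the per-cell scan runs only when the zero count already equals hole, replacing A's per-offset ovlap/ovsize bookkeeping and stateful early-return counting loop.
-- outside the precondition, e.g. on check([[9], [8, 8]], [[0]], 1): A returns True, B returns True; on check([[9]], [[0], [0, 0]], 1): A returns True, B raises IndexError
import Mathlib
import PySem

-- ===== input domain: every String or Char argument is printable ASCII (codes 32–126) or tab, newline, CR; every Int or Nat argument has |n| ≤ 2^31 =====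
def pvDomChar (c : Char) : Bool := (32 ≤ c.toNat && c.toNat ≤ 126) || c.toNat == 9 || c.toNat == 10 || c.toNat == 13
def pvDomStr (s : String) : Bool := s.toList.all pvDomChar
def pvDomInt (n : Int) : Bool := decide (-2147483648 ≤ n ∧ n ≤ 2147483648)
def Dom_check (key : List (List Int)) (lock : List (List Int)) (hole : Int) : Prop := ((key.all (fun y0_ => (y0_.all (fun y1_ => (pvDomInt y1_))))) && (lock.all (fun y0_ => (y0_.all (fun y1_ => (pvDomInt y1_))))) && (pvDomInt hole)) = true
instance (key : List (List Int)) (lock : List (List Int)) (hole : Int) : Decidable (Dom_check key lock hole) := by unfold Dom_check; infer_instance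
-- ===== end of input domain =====

-- B replaces A's per-offset ovlap/ovsize bookkeeping and stateful early-return counting loop by direct
-- displacement enumeration plus a precomputed 2D prefix-sum table of lock's zero counts (alternative; return value only).


-- ===== PORT A =====
-- grid[y][x]; the default fires only outside Pre_check (Python raises IndexError there)
def cell (g : List (List Int)) (y x : Int) : Int :=
  PySem.List.pyGetD (PySem.List.pyGetD g y []) x 0

-- early 'return False' is the accumulator value none, propagated to the end of both loops
def check_one (key lock : List (List Int)) (key_x key_y lock_x lock_y ovsize_x ovsize_y hole : Int) : Bool :=
  match (PySem.List.pyRange 0 ovsize_y 1).foldl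
      (fun acc i =>
        (PySem.List.pyRange 0 ovsize_x 1).foldl
          (fun acc2 j =>
            match acc2 with
            | none => none
            | some h =>
              if cell key (key_y + i) (key_x + j) = cell lock (lock_y + i) (lock_x + j) then none
              else if cell lock (lock_y + i) (lock_x + j) = 0 then some (h - 1) else some h)
          acc)
      (some hole) with
  | none => false
  | some h => decide (h = 0)

def check (key : List (List Int)) (lock : List (List Int)) (hole : Int) : Bool :=
  let size := PySem.List.len key + PySem.List.len lock - 1
  let lock_y := PySem.List.len key - 1
  let lock_x := PySem.List.len key - 1
  (PySem.List.pyRange 0 size 1).any fun key_y =>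
    (PySem.List.pyRange 0 size 1).any fun key_x =>
      let ovlap_y := max key_y lock_y
      let ovsize_y := min (key_y + PySem.List.len key - ovlap_y) (lock_y + PySem.List.len lock - ovlap_y)
      let ovlap_x := max key_x lock_x
      let ovsize_x := min (key_x + PySem.List.len key - ovlap_x) (lock_x + PySem.List.len lock - ovlap_x)
      check_one key lock (ovlap_x - key_x) (ovlap_y - key_y) (ovlap_x - lock_x) (ovlap_y - lock_y)
        ovsize_x ovsize_y hole

-- ===== PORT B =====
def check_alt (key : List (List Int)) (lock : List (List Int)) (hole : Int) : Bool :=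
  let n := PySem.List.len key
  let m := PySem.List.len lock
  let P := (PySem.List.pyRange 0 m 1).foldl
    (fun P i =>
      let prev := PySem.List.pyGetD P (-1) []
      let row := (PySem.List.pyRange 0 m 1).foldl
        (fun row j =>
          row ++ [PySem.List.pyGetD prev (j + 1) 0 + PySem.List.pyGetD row j 0
                   - PySem.List.pyGetD prev j 0
                   + (if cell lock i j = 0 then 1 else 0)])
        [(0 : Int)]
      P ++ [row])
    [PySem.List.pyRepeat [(0 : Int)] (m + 1)]
  (PySem.List.pyRange (1 - n) m 1).any fun dy =>
    (PySem.List.pyRange (1 - n) m 1).any fun dx =>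
      let r0 := max 0 dy
      let r1 := min m (dy + n)
      let c0 := max 0 dx
      let c1 := min m (dx + n)
      let zeros := cell P r1 c1 - cell P r0 c1 - cell P r1 c0 + cell P r0 c0
      decide (zeros = hole) &&
        ((PySem.List.pyRange r0 r1 1).all fun r =>
          (PySem.List.pyRange c0 c1 1).all fun c =>
            decide (cell key (r - dy) (c - dx) ≠ cell lock r c))

-- ===== PRECONDITION & SPEC =====
-- Pre_ excludes ragged inputs (a row shorter than its matrix's height): Python's indexing raises
-- IndexError on essentially all of them; on a few of them A happens to return before touching a missing cell.
def Pre_check (key : List (List Int)) (lock : List (List Int)) (hole : Int) : Prop :=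
  (∀ row ∈ key, key.length ≤ row.length) ∧ (∀ row ∈ lock, lock.length ≤ row.length)
instance (key : List (List Int)) (lock : List (List Int)) (hole : Int) : Decidable (Pre_check key lock hole) := by unfold Pre_check; infer_instance

def pvWitness_check : List (List Int) × List (List Int) × Int := ([[1]], [[0]], 1)

def Spec_check (key : List (List Int)) (lock : List (List Int)) (hole : Int) (out : Bool) : Prop := out = check_alt key lock hole
instance (key : List (List Int)) (lock : List (List Int)) (hole : Int) (out : Bool) : Decidable (Spec_check key lock hole out) := by unfold Spec_check; infer_instance

-- ===== CLAIM (what is proved, stated in full; the proofs are below) =====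
def Claim_equal_check : Prop := ∀ (key : List (List Int)) (lock : List (List Int)) (hole : Int), Dom_check key lock hole → Pre_check key lock hole → Spec_check key lock hole (check key lock hole)

-- ===== LEMMAS AND PROOFS =====

def indI (lock : List (List Int)) (r c : Int) : Int := if cell lock r c = 0 then 1 else 0

def Zp (lock : List (List Int)) (r c : Nat) : Int :=
  ∑ i ∈ Finset.range r, ∑ j ∈ Finset.range c, indI lock i j

theorem sum_map_range (n : Nat) (f : Nat → Int) : ((List.range n).map f).sum = ∑ i ∈ Finset.range n, f i := rfl

theorem Z_zero (lock : List (List Int)) (c : Nat) : Zp lock 0 c = 0 := by simp [Zp]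

theorem Z_zero_right (lock : List (List Int)) (r : Nat) : Zp lock r 0 = 0 := by simp [Zp]

theorem Z_succ_left (lock : List (List Int)) (r c : Nat) :
    Zp lock (r + 1) c = Zp lock r c + ∑ j ∈ Finset.range c, indI lock r j :=
  Finset.sum_range_succ _ _

theorem Z_rec (lock : List (List Int)) (r c : Nat) :
    Zp lock (r + 1) (c + 1)
      = Zp lock r (c + 1) + Zp lock (r + 1) c - Zp lock r c + indI lock r c := by
  have h1 := Z_succ_left lock r (c + 1)
  have h2 := Z_succ_left lock r c
  have h3 : ∑ j ∈ Finset.range (c + 1), indI lock r j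
      = (∑ j ∈ Finset.range c, indI lock r j) + indI lock r c := Finset.sum_range_succ _ _
  push_cast at *
  linarith

theorem rect_sum (lock : List (List Int)) (a b c d : Nat) (hab : a ≤ b) (hcd : c ≤ d) :
    Zp lock b d - Zp lock a d - Zp lock b c + Zp lock a c
      = ∑ i ∈ Finset.range (b - a), ∑ j ∈ Finset.range (d - c), indI lock (a + i) (c + j) := by
  have row : ∀ r : Nat,
      (∑ j ∈ Finset.range d, indI lock r j) - (∑ j ∈ Finset.range c, indI lock r j)
        = ∑ j ∈ Finset.range (d - c), indI lock r (c + j) := by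
    intro r
    rw [← Finset.sum_Ico_eq_sub _ hcd, Finset.sum_Ico_eq_sum_range]
    exact Finset.sum_congr rfl (by intro j hj; push_cast; ring_nf)
  have colD : ∀ cc : Nat, Zp lock b cc - Zp lock a cc
      = ∑ i ∈ Finset.range (b - a), ∑ j ∈ Finset.range cc, indI lock (a + i) j := by
    intro cc
    unfold Zp
    rw [← Finset.sum_Ico_eq_sub _ hab, Finset.sum_Ico_eq_sum_range]
    exact Finset.sum_congr rfl (by
      intro i hi
      exact Finset.sum_congr rfl (by intro j hj; push_cast; ring_nf))
  calc Zp lock b d - Zp lock a d - Zp lock b c + Zp lock a c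
      = (Zp lock b d - Zp lock a d) - (Zp lock b c - Zp lock a c) := by ring
    _ = ∑ i ∈ Finset.range (b - a), ((∑ j ∈ Finset.range d, indI lock (a + i) j)
          - ∑ j ∈ Finset.range c, indI lock (a + i) j) := by
          rw [colD d, colD c, ← Finset.sum_sub_distrib]
    _ = _ := Finset.sum_congr rfl (by intro i hi; exact row (a + i))

theorem inner_none (key lock : List (List Int)) (key_x key_y lock_x lock_y i : Int) (js : List Int) :
    js.foldl
      (fun acc2 j =>
        match acc2 with
        | none => none
        | some h =>
          if cell key (key_y + i) (key_x + j) = cell lock (lock_y + i) (lock_x + j) then none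
          else if cell lock (lock_y + i) (lock_x + j) = 0 then some (h - 1) else some h)
      (none : Option Int) = none := by
  induction js with
  | nil => rfl
  | cons j js ih => simpa using ih

theorem inner_some (key lock : List (List Int)) (key_x key_y lock_x lock_y i : Int) (js : List Int) (h : Int) :
    js.foldl
      (fun acc2 j =>
        match acc2 with
        | none => none
        | some h =>
          if cell key (key_y + i) (key_x + j) = cell lock (lock_y + i) (lock_x + j) then none
          else if cell lock (lock_y + i) (lock_x + j) = 0 then some (h - 1) else some h)
      (some h)
    = if js.any (fun j => decide (cell key (key_y + i) (key_x + j) = cell lock (lock_y + i) (lock_x + j)))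
        then none
        else some (h - (js.map (fun j => indI lock (lock_y + i) (lock_x + j))).sum) := by
  induction js generalizing h with
  | nil => simp
  | cons j js ih =>
    by_cases hm : cell key (key_y + i) (key_x + j) = cell lock (lock_y + i) (lock_x + j)
    · simp [hm, inner_none]
    · by_cases hz : cell lock (lock_y + i) (lock_x + j) = 0
      · simp only [List.foldl_cons, List.any_cons, List.map_cons, List.sum_cons]
        rw [if_neg hm, if_pos hz, ih, decide_eq_false hm]
        simp only [Bool.false_or]
        split_ifs with hA
        · rfl
        · simp only [indI, if_pos hz]
          congr 1
          ring
      · simp only [List.foldl_cons, List.any_cons, List.map_cons, List.sum_cons]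
        rw [if_neg hm, if_neg hz, ih, decide_eq_false hm]
        simp only [Bool.false_or]
        split_ifs with hA
        · rfl
        · simp only [indI, if_neg hz]
          congr 1
          ring

theorem outer_none (key lock : List (List Int)) (key_x key_y lock_x lock_y ovsize_x : Int) (is : List Int) :
    is.foldl
      (fun acc i =>
        (PySem.List.pyRange 0 ovsize_x 1).foldl
          (fun acc2 j =>
            match acc2 with
            | none => none
            | some h =>
              if cell key (key_y + i) (key_x + j) = cell lock (lock_y + i) (lock_x + j) then none
              else if cell lock (lock_y + i) (lock_x + j) = 0 then some (h - 1) else some h)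
          acc)
      (none : Option Int) = none := by
  induction is with
  | nil => rfl
  | cons i is ih => simpa [inner_none] using ih

theorem outer_some (key lock : List (List Int)) (key_x key_y lock_x lock_y ovsize_x : Int) (is : List Int) (h : Int) :
    is.foldl
      (fun acc i =>
        (PySem.List.pyRange 0 ovsize_x 1).foldl
          (fun acc2 j =>
            match acc2 with
            | none => none
            | some h =>
              if cell key (key_y + i) (key_x + j) = cell lock (lock_y + i) (lock_x + j) then none
              else if cell lock (lock_y + i) (lock_x + j) = 0 then some (h - 1) else some h)
          acc)
      (some h)
    = if is.any (fun i => (PySem.List.pyRange 0 ovsize_x 1).any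
          (fun j => decide (cell key (key_y + i) (key_x + j) = cell lock (lock_y + i) (lock_x + j))))
        then none
        else some (h - (is.map (fun i =>
          ((PySem.List.pyRange 0 ovsize_x 1).map (fun j => indI lock (lock_y + i) (lock_x + j))).sum)).sum) := by
  induction is generalizing h with
  | nil => simp
  | cons i is ih =>
    simp only [List.foldl_cons, List.any_cons, List.map_cons, List.sum_cons]
    rw [inner_some]
    by_cases hA : (PySem.List.pyRange 0 ovsize_x 1).any
        (fun j => decide (cell key (key_y + i) (key_x + j) = cell lock (lock_y + i) (lock_x + j))) = true
    · rw [if_pos hA, outer_none, hA]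
      simp
    · rw [if_neg hA, ih]
      simp only [Bool.not_eq_true] at hA
      rw [hA]
      simp only [Bool.false_or]
      split_ifs with hB
      · rfl
      · congr 1
        ring

theorem checkOne_eq (key lock : List (List Int)) (key_x key_y lock_x lock_y ovsize_x ovsize_y hole : Int) :
    check_one key lock key_x key_y lock_x lock_y ovsize_x ovsize_y hole
    = ((!((PySem.List.pyRange 0 ovsize_y 1).any fun i =>
          (PySem.List.pyRange 0 ovsize_x 1).any fun j =>
            decide (cell key (key_y + i) (key_x + j) = cell lock (lock_y + i) (lock_x + j))))
       && decide (hole = ((PySem.List.pyRange 0 ovsize_y 1).map (fun i =>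
            ((PySem.List.pyRange 0 ovsize_x 1).map (fun j => indI lock (lock_y + i) (lock_x + j))).sum)).sum)) := by
  unfold check_one
  rw [outer_some]
  split_ifs with hA
  · rw [hA]; rfl
  · simp only [Bool.not_eq_true] at hA
    rw [hA]
    simp only [Bool.not_false, Bool.true_and]
    exact decide_eq_decide.mpr (by omega)

def prowF' (lock : List (List Int)) (M r : Nat) : List Int :=
  (List.range (M + 1)).map (fun c => Zp lock r c)

theorem inner_invariant (lock : List (List Int)) (M k : Nat) (j : Nat) (hj : j ≤ M) :
    (PySem.List.pyRange 0 (j : Int) 1).foldl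
      (fun row jv =>
        row ++ [PySem.List.pyGetD (prowF' lock M k) (jv + 1) 0 + PySem.List.pyGetD row jv 0
                 - PySem.List.pyGetD (prowF' lock M k) jv 0
                 + (if cell lock (k : Int) jv = 0 then 1 else 0)])
      [(0 : Int)]
    = (List.range (j + 1)).map (fun c => Zp lock (k + 1) c) := by
  induction j with
  | zero =>
    simp [PySem.List.pyRange_one_eq_nil, Z_zero_right]
  | succ j ih =>
    have hj' : j ≤ M := Nat.le_of_succ_le hj
    have hcast : ((j + 1 : Nat) : Int) = (j : Int) + 1 := by push_cast; ring
    rw [hcast, PySem.List.pyRange_one_succ_right (by positivity), List.foldl_append]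
    rw [ih hj']
    simp only [List.foldl_cons, List.foldl_nil]
    have h1 : PySem.List.pyGetD (prowF' lock M k) ((j : Int) + 1) 0 = Zp lock k (j + 1) := by
      rw [show ((j : Int) + 1) = ((j + 1 : Nat) : Int) by push_cast; ring, PySem.List.pyGetD_natCast]
      unfold prowF'
      rw [PySem.List.getD_map_range _ _ _ _ (by omega)]
    have h2 : PySem.List.pyGetD ((List.range (j + 1)).map (fun c => Zp lock (k + 1) c)) (j : Int) 0
        = Zp lock (k + 1) j := by
      rw [PySem.List.pyGetD_natCast, PySem.List.getD_map_range _ _ _ _ (by omega)]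
    have h3 : PySem.List.pyGetD (prowF' lock M k) (j : Int) 0 = Zp lock k j := by
      rw [PySem.List.pyGetD_natCast]
      unfold prowF'
      rw [PySem.List.getD_map_range _ _ _ _ (by omega)]
    rw [h1, h2, h3, List.range_succ (n := j + 1), List.map_append]
    simp only [List.map_cons, List.map_nil]
    congr 1
    rw [Z_rec]
    unfold indI
    ring_nf

theorem outer_invariant (lock : List (List Int)) (M : Nat) (k : Nat) (hk : k ≤ M) :
    (PySem.List.pyRange 0 (k : Int) 1).foldl
      (fun P i =>
        let prev := PySem.List.pyGetD P (-1) []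
        let row := (PySem.List.pyRange 0 (M : Int) 1).foldl
          (fun row j =>
            row ++ [PySem.List.pyGetD prev (j + 1) 0 + PySem.List.pyGetD row j 0
                     - PySem.List.pyGetD prev j 0
                     + (if cell lock i j = 0 then 1 else 0)])
          [(0 : Int)]
        P ++ [row])
      [PySem.List.pyRepeat [(0 : Int)] ((M : Int) + 1)]
    = (List.range (k + 1)).map (prowF' lock M) := by
  induction k with
  | zero =>
    rw [show ((0:Nat):Int) = 0 by rfl, PySem.List.pyRange_one_eq_nil le_rfl, List.foldl_nil]
    rw [PySem.List.pyRepeat_singleton]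
    have : ((M : Int) + 1).toNat = M + 1 := by omega
    rw [this]
    simp only [zero_add, List.range_one, List.map_cons, List.map_nil]
    congr 1
    unfold prowF'
    symm
    rw [List.eq_replicate_iff]
    refine ⟨by simp, ?_⟩
    intro b hb
    simp only [List.mem_map, List.mem_range] at hb
    obtain ⟨c, _, rfl⟩ := hb
    exact Z_zero lock c
  | succ k ih =>
    have hk' : k ≤ M := Nat.le_of_succ_le hk
    have hcast : ((k + 1 : Nat) : Int) = (k : Int) + 1 := by push_cast; ring
    rw [hcast, PySem.List.pyRange_one_succ_right (by positivity), List.foldl_append]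
    rw [ih hk']
    simp only [List.foldl_cons, List.foldl_nil]
    have hprev : PySem.List.pyGetD ((List.range (k + 1)).map (prowF' lock M)) (-1) []
        = prowF' lock M k := by
      rw [List.range_succ, List.map_append]
      simp only [List.map_cons, List.map_nil]
      exact PySem.List.pyGetD_neg_one_append_singleton _ _ _
    rw [hprev, inner_invariant lock M k M le_rfl]
    rw [List.range_succ (n := k + 1), List.map_append]
    simp [prowF']

theorem cellP (lock : List (List Int)) (M : Nat) (r c : Int)
    (h0r : 0 ≤ r) (hrM : r ≤ (M : Int)) (h0c : 0 ≤ c) (hcM : c ≤ (M : Int)) :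
    cell ((List.range (M + 1)).map (prowF' lock M)) r c = Zp lock r.toNat c.toNat := by
  unfold cell
  rw [PySem.List.pyGetD_eq_getElem _ _ h0r (by simp; omega)]
  rw [List.getElem_map, List.getElem_range]
  unfold prowF'
  rw [PySem.List.pyGetD_of_nonneg _ _ h0c, PySem.List.getD_map_range _ _ _ _ (by omega)]

def offSpec (key lock : List (List Int)) (hole dy dx : Int) : Bool :=
  (!((List.range (min (lock.length : Int) (dy + key.length) - max 0 dy).toNat).any fun i =>
      (List.range (min (lock.length : Int) (dx + key.length) - max 0 dx).toNat).any fun j =>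
        decide (cell key (max 0 dy + i - dy) (max 0 dx + j - dx) = cell lock (max 0 dy + i) (max 0 dx + j))))
  && decide (hole =
      ∑ i ∈ Finset.range (min (lock.length : Int) (dy + key.length) - max 0 dy).toNat,
        ∑ j ∈ Finset.range (min (lock.length : Int) (dx + key.length) - max 0 dx).toNat,
          indI lock (max 0 dy + i) (max 0 dx + j))

theorem B_off (key lock : List (List Int)) (hole dy dx : Int)
    (hdy1 : 1 - (key.length : Int) ≤ dy) (hdy2 : dy < (lock.length : Int))
    (hdx1 : 1 - (key.length : Int) ≤ dx) (hdx2 : dx < (lock.length : Int)) :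
    (decide ((cell ((List.range (lock.length + 1)).map (prowF' lock lock.length))
                (min (lock.length : Int) (dy + key.length)) (min (lock.length : Int) (dx + key.length))
              - cell ((List.range (lock.length + 1)).map (prowF' lock lock.length))
                (max 0 dy) (min (lock.length : Int) (dx + key.length))
              - cell ((List.range (lock.length + 1)).map (prowF' lock lock.length))
                (min (lock.length : Int) (dy + key.length)) (max 0 dx)
              + cell ((List.range (lock.length + 1)).map (prowF' lock lock.length))
                (max 0 dy) (max 0 dx)) = hole)
      && ((PySem.List.pyRange (max 0 dy) (min (lock.length : Int) (dy + key.length)) 1).all fun r =>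
            (PySem.List.pyRange (max 0 dx) (min (lock.length : Int) (dx + key.length)) 1).all fun c =>
              decide (cell key (r - dy) (c - dx) ≠ cell lock r c)))
    = offSpec key lock hole dy dx := by
  have hN : (0 : Int) ≤ (key.length : Int) := by positivity
  have hM : (0 : Int) ≤ (lock.length : Int) := by positivity
  rw [cellP _ _ _ _ (by omega) (by omega) (by omega) (by omega)]
  rw [cellP _ _ _ _ (by omega) (by omega) (by omega) (by omega)]
  rw [cellP _ _ _ _ (by omega) (by omega) (by omega) (by omega)]
  rw [cellP _ _ _ _ (by omega) (by omega) (by omega) (by omega)]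
  rw [rect_sum lock _ _ _ _ (by omega) (by omega)]
  unfold offSpec
  rw [Bool.and_comm]
  congr 1
  -- the all-side equals the !any side
  · simp only [List.not_any_eq_all_not, ← decide_not]
    rw [PySem.List.pyRange_one, List.all_map]
    refine List.all_congr rfl ?_
    intro k
    simp only [Function.comp_def]
    rw [PySem.List.pyRange_one, List.all_map]
    refine List.all_congr rfl ?_
    intro j
    simp only [Function.comp_def]
  -- the counting side
  · rw [decide_eq_decide]
    constructor
    · intro h
      rw [← h]
      apply Finset.sum_congr (by congr 1 <;> omega)
      intro i hi
      apply Finset.sum_congr (by congr 1 <;> omega)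
      intro j hj
      congr 1 <;> omega
    · intro h
      rw [h]
      apply Finset.sum_congr (by congr 1 <;> omega)
      intro i hi
      apply Finset.sum_congr (by congr 1 <;> omega)
      intro j hj
      congr 1 <;> omega

theorem A_off (key lock : List (List Int)) (hole dy dx : Int) :
    check_one key lock (max 0 dx - dx) (max 0 dy - dy) (max 0 dx) (max 0 dy)
      (min (lock.length : Int) (dx + key.length) - max 0 dx)
      (min (lock.length : Int) (dy + key.length) - max 0 dy) hole
    = offSpec key lock hole dy dx := by
  rw [checkOne_eq]
  unfold offSpec
  simp only [PySem.List.pyRange_one, sub_zero, List.any_map, List.map_map, Function.comp_def,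
    zero_add, sum_map_range]
  congr 1
  · apply congrArg
    refine List.any_congr rfl ?_
    intro i
    refine List.any_congr rfl ?_
    intro j
    have e1 : max 0 dy - dy + (i : Int) = max 0 dy + i - dy := by ring
    have e2 : max 0 dx - dx + (j : Int) = max 0 dx + j - dx := by ring
    rw [e1, e2]

set_option maxHeartbeats 1000000 in
theorem main_eq (key lock : List (List Int)) (hole : Int) :
    check key lock hole = check_alt key lock hole := by
  unfold check check_alt
  simp only [PySem.List.len]
  simp only [outer_invariant lock lock.length lock.length le_rfl]
  trans ((List.range ((lock.length : Int) - (1 - (key.length : Int))).toNat).any fun k =>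
         (List.range ((lock.length : Int) - (1 - (key.length : Int))).toNat).any fun l =>
           offSpec key lock hole (1 - (key.length : Int) + (k : Int)) (1 - (key.length : Int) + (l : Int)))
  · -- A side
    rw [PySem.List.pyRange_one]
    rw [show ((key.length : Int) + (lock.length : Int) - 1 - 0).toNat
        = ((lock.length : Int) - (1 - (key.length : Int))).toNat by omega]
    rw [List.any_map]
    refine List.any_congr rfl ?_
    intro k
    simp only [Function.comp_def, zero_add]
    rw [List.any_map]
    refine List.any_congr rfl ?_
    intro l
    simp only [Function.comp_def, zero_add]
    have e1 : max (l : Int) ((key.length : Int) - 1) - (l : Int)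
        = max 0 (1 - (key.length : Int) + (l : Int)) - (1 - (key.length : Int) + (l : Int)) := by omega
    have e2 : max (k : Int) ((key.length : Int) - 1) - (k : Int)
        = max 0 (1 - (key.length : Int) + (k : Int)) - (1 - (key.length : Int) + (k : Int)) := by omega
    have e3 : max (l : Int) ((key.length : Int) - 1) - ((key.length : Int) - 1)
        = max 0 (1 - (key.length : Int) + (l : Int)) := by omega
    have e4 : max (k : Int) ((key.length : Int) - 1) - ((key.length : Int) - 1)
        = max 0 (1 - (key.length : Int) + (k : Int)) := by omega
    have e5 : min ((l : Int) + (key.length : Int) - max (l : Int) ((key.length : Int) - 1))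
          (((key.length : Int) - 1) + (lock.length : Int) - max (l : Int) ((key.length : Int) - 1))
        = min ((lock.length : Int)) ((1 - (key.length : Int) + (l : Int)) + (key.length : Int))
          - max 0 (1 - (key.length : Int) + (l : Int)) := by omega
    have e6 : min ((k : Int) + (key.length : Int) - max (k : Int) ((key.length : Int) - 1))
          (((key.length : Int) - 1) + (lock.length : Int) - max (k : Int) ((key.length : Int) - 1))
        = min ((lock.length : Int)) ((1 - (key.length : Int) + (k : Int)) + (key.length : Int))
          - max 0 (1 - (key.length : Int) + (k : Int)) := by omega
    rw [e1, e2, e3, e4, e5, e6]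
    exact A_off key lock hole _ _
  · -- B side
    symm
    rw [PySem.List.pyRange_one, List.any_map]
    refine PySem.List.any_congr_mem ?_
    intro k hk
    simp only [Function.comp_def]
    rw [List.any_map]
    refine PySem.List.any_congr_mem ?_
    intro l hl
    simp only [Function.comp_def]
    simp only [List.mem_range] at hk hl
    rw [← B_off key lock hole (1 - (key.length : Int) + (k : Int)) (1 - (key.length : Int) + (l : Int))
      (by omega) (by omega) (by omega) (by omega)]

-- ===== VERDICT (by name: the statement is the Claim_ definition above) =====
theorem check_spec : Claim_equal_check := by
  intro key lock hole _ _
  unfold Spec_check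
  exact main_eq key lock hole
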